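-- pv_equiv track=rewrite | github.com/DYDKA4/cloud_SP | final/final_debug.py | ind_eq
-- ===== SOURCE A (Python) =====
-- def ind_eq(arr):
--     n = len(arr)
--     res = []
--     for i in range(n - 1):
--         for j in range(i + 1, n):
--             if min(arr) == arr[i] and arr[i] == arr[j]:
--                 res.append((i, j))
--     return res
-- ===== SOURCE B (Python) =====
-- def pairs(idx):
--     if not idx:
--         return []
--     head, rest = idx[0], idx[1:]
--     return [(head, j) for j in rest] + pairs(rest)
--
--
-- def ind_eq(arr):
--     if not arr:
--         return []
--     m = min(arr)
--     idx = [i for i, x in enumerate(arr) if x == m]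
--     return pairs(idx)
-- ===== Notes on version B (the rewrite author's own statement) =====
-- stated objective: faster
-- what changed: B computes min(arr) once, collects the indices where it occurs via one enumerate pass, and emits the ordered index combinations of that list, instead of A's nested index loops that rescan arr for its minimum in every pair test.
import Mathlib
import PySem

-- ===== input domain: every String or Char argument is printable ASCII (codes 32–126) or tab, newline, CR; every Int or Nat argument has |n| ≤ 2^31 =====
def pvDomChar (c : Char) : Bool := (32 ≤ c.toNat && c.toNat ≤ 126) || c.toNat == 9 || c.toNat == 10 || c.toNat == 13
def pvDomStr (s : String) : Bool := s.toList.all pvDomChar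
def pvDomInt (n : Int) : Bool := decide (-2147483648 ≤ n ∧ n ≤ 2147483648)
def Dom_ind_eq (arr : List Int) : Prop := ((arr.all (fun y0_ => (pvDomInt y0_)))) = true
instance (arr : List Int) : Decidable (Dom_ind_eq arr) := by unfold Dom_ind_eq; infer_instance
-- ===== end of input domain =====

-- B computes min(arr) once, collects the min indices, and emits their ordered
-- combinations directly (objective: faster — A rescans arr for min inside the O(n^2) pair loop).


-- ===== PORT A =====
-- literal port of A: nested index loops, min(arr) recomputed in the test.
-- (min(arr) is ported with PySem.List.min?; the loop body is unreachable when arr = [],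
--  where Python's min would raise, so the Option comparison is exact on all reached inputs)
def ind_eq (arr : List Int) : List (Int × Int) :=
  let n : Int := arr.length
  (PySem.List.pyRange 0 (n - 1) 1).foldl (fun res i =>
    (PySem.List.pyRange (i + 1) n 1).foldl (fun res j =>
      if PySem.List.min? arr (fun x => x) = PySem.List.pyGet? arr i ∧
         PySem.List.pyGet? arr i = PySem.List.pyGet? arr j
      then res ++ [(i, j)] else res) res) []

-- ===== PORT B =====
-- helper 'pairs' of Source B: ordered combinations of a list
def pvPairs : List Int → List (Int × Int)
  | [] => []
  | i :: rest => rest.map (fun j => (i, j)) ++ pvPairs rest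

def ind_eq_alt (arr : List Int) : List (Int × Int) :=
  match PySem.List.min? arr (fun x => x) with
  | none => []          -- 'if not arr: return []'
  | some m =>
    pvPairs (((PySem.List.enumerate arr 0).filter (fun p => p.2 == m)).map (fun p => p.1))

-- ===== PRECONDITION & SPEC =====
def Spec_ind_eq (arr : List Int) (out : List (Int × Int)) : Prop := out = ind_eq_alt arr
instance (arr : List Int) (out : List (Int × Int)) : Decidable (Spec_ind_eq arr out) := by unfold Spec_ind_eq; infer_instance

-- ===== CLAIM (what is proved, stated in full; the proofs are below) =====
def Claim_equal_ind_eq : Prop := ∀ (arr : List Int), Dom_ind_eq arr → Spec_ind_eq arr (ind_eq arr)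

-- ===== LEMMAS AND PROOFS =====

-- inner loop of A, as a filter+map
lemma ind_eq_inner (arr : List Int) (i : Int) (res : List (Int × Int)) :
    (PySem.List.pyRange (i + 1) (arr.length : Int) 1).foldl (fun res j =>
      if PySem.List.min? arr (fun x => x) = PySem.List.pyGet? arr i ∧
         PySem.List.pyGet? arr i = PySem.List.pyGet? arr j
      then res ++ [(i, j)] else res) res
    = res ++ ((PySem.List.pyRange (i + 1) (arr.length : Int) 1).filter
        (fun j => decide (PySem.List.min? arr (fun x => x) = PySem.List.pyGet? arr i ∧
                          PySem.List.pyGet? arr i = PySem.List.pyGet? arr j))).map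
        (fun j => (i, j)) := by
  exact PySem.List.foldl_append_ite _ _ _ _

-- the combinatorial core: pvPairs of a filtered range equals A's nested-loop flatMap
lemma pvPairs_filter_range (arr : List Int) (m : Int)
    (hm : PySem.List.min? arr (fun x => x) = some m) :
    ∀ (k : Nat) (a : Int), (arr.length : Int) - a ≤ (k : Int) →
    pvPairs ((PySem.List.pyRange a (arr.length : Int) 1).filter
        (fun i => decide (PySem.List.pyGet? arr i = some m)))
    = (PySem.List.pyRange a (arr.length : Int) 1).flatMap (fun i =>
        ((PySem.List.pyRange (i + 1) (arr.length : Int) 1).filter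
          (fun j => decide (PySem.List.min? arr (fun x => x) = PySem.List.pyGet? arr i ∧
                            PySem.List.pyGet? arr i = PySem.List.pyGet? arr j))).map
          (fun j => (i, j))) := by
  intro k
  induction k with
  | zero =>
    intro a ha
    rw [PySem.List.pyRange_one_eq_nil (by omega)]
    simp [pvPairs]
  | succ k ih =>
    intro a ha
    by_cases hlt : a < (arr.length : Int)
    · rw [PySem.List.pyRange_one_cons hlt]
      by_cases hPa : PySem.List.pyGet? arr a = some m
      · have hfilt : (PySem.List.pyRange (a + 1) (arr.length : Int) 1).filter
            (fun j => decide (PySem.List.min? arr (fun x => x) = PySem.List.pyGet? arr a ∧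
                     PySem.List.pyGet? arr a = PySem.List.pyGet? arr j))
            = (PySem.List.pyRange (a + 1) (arr.length : Int) 1).filter
            (fun j => decide (PySem.List.pyGet? arr j = some m)) := by
          apply List.filter_congr
          intro j _
          simp only [decide_eq_decide]
          constructor
          · rintro ⟨_, h2⟩; rw [← h2, hPa]
          · intro h; exact ⟨by rw [hm, hPa], by rw [hPa, h]⟩
        rw [List.filter_cons_of_pos (by simp [hPa]), List.flatMap_cons, hfilt]
        simp only [pvPairs]
        rw [ih (a + 1) (by omega)]
      · have hfilt : (PySem.List.pyRange (a + 1) (arr.length : Int) 1).filter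
            (fun j => decide (PySem.List.min? arr (fun x => x) = PySem.List.pyGet? arr a ∧
                     PySem.List.pyGet? arr a = PySem.List.pyGet? arr j))
            = [] := by
          apply List.filter_eq_nil_iff.mpr
          intro j _
          simp only [decide_eq_true_eq]
          rintro ⟨h1, _⟩; exact hPa (by rw [← h1, hm])
        rw [List.filter_cons_of_neg (by simp [hPa]), List.flatMap_cons, hfilt]
        simp only [List.map_nil, List.nil_append]
        exact ih (a + 1) (by omega)
    · rw [PySem.List.pyRange_one_eq_nil (by omega)]
      simp [pvPairs]

-- B's index list is the filtered range
lemma idx_eq_filter_range (arr : List Int) (m : Int) :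
    ((PySem.List.enumerate arr 0).filter (fun p => p.2 == m)).map (fun p => p.1)
    = (PySem.List.pyRange 0 (arr.length : Int) 1).filter
        (fun i => decide (PySem.List.pyGet? arr i = some m)) := by
  rw [PySem.List.enumerate_eq_map_pyRange arr 0, List.filter_map, List.map_map]
  simp only [PySem.List.len_eq]
  have h1 : ((fun p : Int × Int => p.1) ∘ fun j => (j, PySem.List.pyGetD arr j 0)) = fun j : Int => j := rfl
  rw [h1, List.map_id']
  apply List.filter_congr
  intro j hj
  have hb := PySem.List.mem_pyRange_one.mp hj
  have hlt : j.toNat < arr.length := by omega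
  simp only [Function.comp_def]
  simp [PySem.List.pyGetD, PySem.List.pyGet?_of_nonneg _ hb.1, List.getElem?_eq_getElem hlt]
  by_cases he : arr[j.toNat] = m <;> simp [he]

-- ===== VERDICT (by name: the statement is the Claim_ definition above) =====
theorem ind_eq_spec : Claim_equal_ind_eq := by
  intro arr _
  show ind_eq arr = ind_eq_alt arr
  cases h : PySem.List.min? arr (fun x => x) with
  | none =>
    have harr : arr = [] := by
      have := PySem.List.min?_eq_none_iff (xs := arr) (key := fun x => x)
      exact this.mp h
    subst harr
    decide
  | some m =>
    have hne : arr ≠ [] := List.ne_nil_of_mem (PySem.List.min?_mem h)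
    have hn : (1 : Int) ≤ (arr.length : Int) := by
      have := List.length_pos_iff.mpr hne
      exact_mod_cast this
    have halt : ind_eq_alt arr
        = pvPairs (((PySem.List.enumerate arr 0).filter (fun p => p.2 == m)).map (fun p => p.1)) := by
      simp only [ind_eq_alt, h]
    rw [halt, idx_eq_filter_range arr m]
    simp only [ind_eq]
    have hfun : (fun (res : List (Int × Int)) (i : Int) =>
        (PySem.List.pyRange (i + 1) (arr.length : Int) 1).foldl (fun res j =>
          if PySem.List.min? arr (fun x => x) = PySem.List.pyGet? arr i ∧
             PySem.List.pyGet? arr i = PySem.List.pyGet? arr j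
          then res ++ [(i, j)] else res) res)
        = fun res i => res ++ ((PySem.List.pyRange (i + 1) (arr.length : Int) 1).filter
            (fun j => decide (PySem.List.min? arr (fun x => x) = PySem.List.pyGet? arr i ∧
                      PySem.List.pyGet? arr i = PySem.List.pyGet? arr j))).map (fun j => (i, j)) :=
      funext fun res => funext fun i => ind_eq_inner arr i res
    rw [hfun, PySem.List.foldl_append_eq_flatMap, List.nil_append]
    rw [pvPairs_filter_range arr m h arr.length 0 (by omega)]
    have hsplit : PySem.List.pyRange 0 ((arr.length : Int)) 1
        = PySem.List.pyRange 0 ((arr.length : Int) - 1) 1 ++ [(arr.length : Int) - 1] := by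
      have h2 := PySem.List.pyRange_one_succ_right (a := 0) (b := (arr.length : Int) - 1) (by omega)
      rw [show ((arr.length : Int) - 1) + 1 = (arr.length : Int) by ring] at h2
      exact h2
    rw [hsplit, List.flatMap_append]
    have hnil : PySem.List.pyRange ((arr.length : Int) - 1 + 1) (arr.length : Int) 1 = [] :=
      PySem.List.pyRange_one_eq_nil (by omega)
    rw [List.flatMap_cons, hnil, List.filter_nil, List.map_nil, List.nil_append,
      List.flatMap_nil, List.append_nil]
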